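-- pv_equiv track=rewrite | github.com/rafaltrojniak/AdventOfCode | 2025/06/part2.py | extract_celophad_number
-- ===== SOURCE A (Python) =====
-- def extract_celophad_number(celophad: list[str], x: int) -> int:
--     number = 0
--     for y in range(len(celophad) - 1):
--         char = celophad[y][x]
--         if char == ' ':
--             continue
--         number = number * 10 + int(char)
--     return number
-- ===== SOURCE B (Python) =====
-- def extract_celophad_number(celophad: list[str], x: int) -> int:
--     # Staged decomposition: extract the column, join the non-space characters
--     # into one string, and parse it with int(); empty column -> 0.
--     column = [row[x] for row in celophad[:-1]]
--     s = ''.join(c for c in column if c != ' ')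
--     return int(s) if s else 0
-- ===== Notes on version B (the rewrite author's own statement) =====
-- stated objective: simpler
-- what changed: Replaces the per-character Horner accumulation loop by a staged pipeline: slice off the last row, collect the column's non-space characters into a string, and parse it once with int() (0 for the empty string).
import Mathlib
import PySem

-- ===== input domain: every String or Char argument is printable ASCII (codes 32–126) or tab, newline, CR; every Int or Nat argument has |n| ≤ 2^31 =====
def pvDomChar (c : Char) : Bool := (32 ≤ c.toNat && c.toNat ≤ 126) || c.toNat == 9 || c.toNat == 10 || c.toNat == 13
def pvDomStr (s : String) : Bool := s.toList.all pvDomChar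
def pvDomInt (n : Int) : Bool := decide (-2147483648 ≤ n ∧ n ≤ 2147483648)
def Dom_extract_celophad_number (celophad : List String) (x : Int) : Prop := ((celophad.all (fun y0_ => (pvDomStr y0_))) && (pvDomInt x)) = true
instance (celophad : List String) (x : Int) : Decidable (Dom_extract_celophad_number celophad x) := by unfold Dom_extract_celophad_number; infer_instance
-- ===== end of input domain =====

-- B replaces A's per-character Horner loop by a staged pipeline (slice off the last
-- row, collect the column's non-space chars, parse once); same cost, simpler shape.


-- ===== PORT A =====
-- celophad[y][x] is ported with pyGetD (default ' ' / ""): Pre_ guarantees both indices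
-- are in range, so the defaults are never read on admitted inputs (Python raises
-- IndexError there).  int(char) is ported as char.toNat - 48: exact for digit chars,
-- which Pre_ guarantees (Python raises ValueError on any other non-space char).
def extract_celophad_number (celophad : List String) (x : Int) : Int :=
  (PySem.List.pyRange 0 ((celophad.length : Int) - 1) 1).foldl
    (fun number y =>
      let char := PySem.List.pyGetD (PySem.List.pyGetD celophad y "").toList x ' '
      if char = ' ' then number
      else number * 10 + ((char.toNat : Int) - 48))
    0

-- ===== PORT B =====
-- celophad[:-1] is List.dropLast; row[x] is pyGetD (in range by Pre_); the joined digit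
-- string is the filtered char list; int(s) on a digit string is the base-10 parse fold
-- (exact there, which Pre_ guarantees); the `if s else 0` branch is the isEmpty test.
def extract_celophad_number_alt (celophad : List String) (x : Int) : Int :=
  let column := celophad.dropLast.map (fun row => PySem.List.pyGetD row.toList x ' ')
  let s := column.filter (fun c => c ≠ ' ')
  if s.isEmpty then 0
  else s.foldl (fun n c => n * 10 + ((c.toNat : Int) - 48)) 0

-- ===== PRECONDITION & SPEC =====
-- Pre_ holds exactly where Python A returns: for every row the loop visits (all but the
-- last), x is a valid Python index into it and the char there is ' ' or a digit
-- (otherwise A raises IndexError resp. ValueError).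
def Pre_extract_celophad_number (celophad : List String) (x : Int) : Prop :=
  ∀ s ∈ celophad.dropLast,
    ((PySem.List.pyGet? s.toList x).map
      (fun c => c == ' ' || (48 ≤ c.toNat && c.toNat ≤ 57))).getD false = true
instance (celophad : List String) (x : Int) : Decidable (Pre_extract_celophad_number celophad x) := by unfold Pre_extract_celophad_number; infer_instance
def pvWitness_extract_celophad_number : List String × Int := (["1", " 2", "45"], 0)

def Spec_extract_celophad_number (celophad : List String) (x : Int) (out : Int) : Prop := out = extract_celophad_number_alt celophad x
instance (celophad : List String) (x : Int) (out : Int) : Decidable (Spec_extract_celophad_number celophad x out) := by unfold Spec_extract_celophad_number; infer_instance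

-- ===== CLAIM (what is proved, stated in full; the proofs are below) =====
def Claim_equal_extract_celophad_number : Prop := ∀ (celophad : List String) (x : Int), Dom_extract_celophad_number celophad x → Pre_extract_celophad_number celophad x → Spec_extract_celophad_number celophad x (extract_celophad_number celophad x)

-- ===== LEMMAS AND PROOFS =====

-- A's loop over range(len-1), read through pyGetD, is the fold over dropLast.
theorem pv_foldA_dropLast (celophad : List String) (x : Int) :
    extract_celophad_number celophad x
      = celophad.dropLast.foldl
          (fun number row =>
            let char := PySem.List.pyGetD row.toList x ' '
            if char = ' ' then number
            else number * 10 + ((char.toNat : Int) - 48))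
          0 := by
  unfold extract_celophad_number
  cases celophad with
  | nil => simp [PySem.List.pyRange]
  | cons h t =>
    have hlen : ((h :: t).length : Int) - 1 = (((h :: t).dropLast).length : Int) := by
      simp
    rw [hlen]
    have key : ∀ (acc : Int), ∀ y ∈ PySem.List.pyRange 0 (((h :: t).dropLast.length : Int)) 1,
        (let char := PySem.List.pyGetD (PySem.List.pyGetD (h :: t) y "").toList x ' '
         if char = ' ' then acc else acc * 10 + ((char.toNat : Int) - 48))
          = (let char := PySem.List.pyGetD (PySem.List.pyGetD (h :: t).dropLast y "").toList x ' '
             if char = ' ' then acc else acc * 10 + ((char.toNat : Int) - 48)) := by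
      intro acc y hy
      rw [PySem.List.mem_pyRange_one] at hy
      obtain ⟨h0, h1⟩ := hy
      have hlt : y < ((h :: t).length : Int) := by
        have : (h :: t).dropLast.length ≤ (h :: t).length := by simp
        omega
      rw [PySem.List.pyGetD_eq_getElem _ _ h0 hlt,
          PySem.List.pyGetD_eq_getElem _ _ h0 h1]
      rw [List.getElem_dropLast]
    rw [PySem.List.foldl_congr_mem _ _
          (fun number y =>
            let char := PySem.List.pyGetD (PySem.List.pyGetD (h :: t).dropLast y "").toList x ' '
            if char = ' ' then number
            else number * 10 + ((char.toNat : Int) - 48)) _ key]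
    exact PySem.List.foldl_pyRange_zero_pyGetD' (h :: t).dropLast ""
          (fun number row =>
            let char := PySem.List.pyGetD row.toList x ' '
            if char = ' ' then number
            else number * 10 + ((char.toNat : Int) - 48)) 0

-- ===== VERDICT (by name: the statement is the Claim_ definition above) =====
theorem extract_celophad_number_spec : Claim_equal_extract_celophad_number := by
  intro celophad x _ _
  unfold Spec_extract_celophad_number extract_celophad_number_alt
  rw [pv_foldA_dropLast]
  simp only []
  -- the empty-string branch returns 0, which is also the fold over []
  rw [show (if ((celophad.dropLast.map (fun row => PySem.List.pyGetD row.toList x ' ')).filter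
        (fun c => c ≠ ' ')).isEmpty then (0 : Int)
      else ((celophad.dropLast.map (fun row => PySem.List.pyGetD row.toList x ' ')).filter
        (fun c => c ≠ ' ')).foldl (fun n c => n * 10 + ((c.toNat : Int) - 48)) 0)
      = ((celophad.dropLast.map (fun row => PySem.List.pyGetD row.toList x ' ')).filter
        (fun c => c ≠ ' ')).foldl (fun n c => n * 10 + ((c.toNat : Int) - 48)) 0 from by
    cases  ((celophad.dropLast.map (fun row => PySem.List.pyGetD row.toList x ' ')).filter
        (fun c => c ≠ ' ')) <;> simp]
  rw [List.foldl_filter, List.foldl_map]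
  apply PySem.List.foldl_congr_mem
  intro acc row _
  by_cases hc : PySem.List.pyGetD row.toList x ' ' = ' ' <;> simp [hc]
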